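-- pv_equiv track=rewrite | github.com/d-jeph/CodeChallenges | RepeatedKLengthSubstrings.py | solve
-- ===== SOURCE A (Python) =====
-- def solve(s, k):
--     seen = []
--     mp = {}
--     for i in range(len(s) - k + 1):
--         substring = s[i : i + k]
--         if mp.get(substring) is None:
--             mp[substring] = 1
--         else:
--             mp[substring] += 1
--     return sum(1 for x in mp.values() if x > 1)
-- ===== SOURCE B (Python) =====
-- def solve(s, k):
--     subs = sorted(s[i : i + k] for i in range(len(s) - k + 1))
--     count = 0
--     run = 0
--     prev = None
--     for sub in subs:
--         if sub == prev:
--             run += 1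
--         else:
--             if run >= 2:
--                 count += 1
--             prev = sub
--             run = 1
--     if run >= 2:
--         count += 1
--     return count
-- ===== Notes on version B (the rewrite author's own statement) =====
-- stated objective: alternative
-- what changed: Replaces A's dict-of-counts plus a final scan over the values by a sort-then-group strategy: B sorts the list of all length-k substrings once and walks it in one pass, counting runs of equal adjacent substrings of length >= 2.
import Mathlib
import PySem

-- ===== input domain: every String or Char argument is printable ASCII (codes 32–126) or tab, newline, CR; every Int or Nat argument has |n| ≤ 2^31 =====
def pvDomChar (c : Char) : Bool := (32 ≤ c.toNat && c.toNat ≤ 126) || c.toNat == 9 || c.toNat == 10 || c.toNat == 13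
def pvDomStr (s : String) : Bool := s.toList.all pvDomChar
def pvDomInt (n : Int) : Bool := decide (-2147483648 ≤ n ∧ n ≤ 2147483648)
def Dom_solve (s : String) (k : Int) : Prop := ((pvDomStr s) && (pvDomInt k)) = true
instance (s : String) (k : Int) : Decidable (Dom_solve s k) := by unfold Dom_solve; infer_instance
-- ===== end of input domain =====

-- B replaces A's dict-of-counts by sorting the substring list and counting runs of equal
-- adjacent substrings of length ≥ 2 in one pass (alternative decomposition, similar cost).

-- ===== PORT A =====
-- the loop body of A: look up the substring, store 1 or add 1
def pvAStep (mp : PySem.Dict String Int) (sub : String) : PySem.Dict String Int :=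
  match mp.get? sub with
  | none => mp.insert sub 1
  | some v => mp.insert sub (v + 1)

def solve (s : String) (k : Int) : Int :=
  let mp := (PySem.List.pyRange 0 (PySem.Str.len s - k + 1) 1).foldl
    (fun mp i => pvAStep mp (PySem.Str.slice s (some i) (some (i + k))))
    PySem.Dict.empty
  ((mp.values.filter (fun x => 1 < x)).length : Int)

-- ===== PORT B =====
-- B's loop body: state (count, prev, run)
def pvBStep (st : Int × Option String × Int) (sub : String) : Int × Option String × Int :=
  if some sub = st.2.1 then (st.1, st.2.1, st.2.2 + 1)
  else ((if 2 ≤ st.2.2 then st.1 + 1 else st.1), some sub, 1)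

-- B's trailing 'if run >= 2: count += 1'
def pvBFin (st : Int × Option String × Int) : Int :=
  if 2 ≤ st.2.2 then st.1 + 1 else st.1

def solve_alt (s : String) (k : Int) : Int :=
  let subs := PySem.List.sorted
    ((PySem.List.pyRange 0 (PySem.Str.len s - k + 1) 1).map
      (fun i => PySem.Str.slice s (some i) (some (i + k)))) (fun x => x) false
  pvBFin (subs.foldl pvBStep (0, none, 0))

-- ===== PRECONDITION & SPEC =====
def Spec_solve (s : String) (k : Int) (out : Int) : Prop := out = solve_alt s k
instance (s : String) (k : Int) (out : Int) : Decidable (Spec_solve s k out) := by unfold Spec_solve; infer_instance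

-- ===== CLAIM (what is proved, stated in full; the proofs are below) =====
def Claim_equal_solve : Prop := ∀ (s : String) (k : Int), Dom_solve s k → Spec_solve s k (solve s k)

-- ===== LEMMAS AND PROOFS =====

-- number of distinct elements occurring at least twice, by repeated group removal
def pvDup : List String → Int
  | [] => 0
  | y :: ys => (if 2 ≤ 1 + ((ys.count y : Nat) : Int) then 1 else 0) + pvDup (ys.filter (fun z => z ≠ y))
termination_by l => l.length
decreasing_by
  simp only [List.length_unattach]
  exact Nat.lt_succ_of_le (by simpa using List.length_filter_le (fun x => decide (x.1 ≠ y)) ys.attach)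

-- A's loop body is the standard counting step
lemma pvAStep_eq (mp : PySem.Dict String Int) (sub : String) :
    pvAStep mp sub = mp.insert sub (mp.getD sub 0 + 1) := by
  unfold pvAStep
  rw [PySem.Dict.getD_eq_get?_getD]
  cases h : mp.get? sub <;> simp

-- A's result, characterised: count the distinct substrings with multiplicity > 1
lemma pvA_char (l : List String) :
    (((l.foldl pvAStep PySem.Dict.empty).values.filter (fun x => 1 < x)).length : Int)
      = ((PySem.Set.ofList l).countP (fun x => decide ((1:Int) < (l.count x : Nat))) : Int) := by
  have h1 : l.foldl pvAStep PySem.Dict.empty = PySem.Dict.counter l := by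
    rw [show pvAStep = (fun (d : PySem.Dict String Int) x => d.insert x (d.getD x 0 + 1)) from
      funext fun d => funext fun x => pvAStep_eq d x]
    exact PySem.Dict.foldl_insert_getD_add_one_eq_counter l
  rw [h1]
  have hv : (PySem.Dict.counter l).values = (PySem.Set.ofList l).map (fun k => ((l.count k : Nat) : Int)) := by
    simp only [PySem.Dict.values, PySem.Dict.items_counter, List.map_map]
    rfl
  rw [hv, List.filter_map, List.length_map]
  rw [← List.countP_eq_length_filter]
  rfl

-- the key correspondence: distinct-with-multiplicity≥2 count equals pvDup
lemma pvCountP_dup : ∀ (n : Nat) (l u : List String), l.length ≤ n → u.Nodup →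
    (∀ x, x ∈ u ↔ x ∈ l) →
    ((u.countP (fun x => decide ((1:Int) < (l.count x : Nat))) : Nat) : Int) = pvDup l := by
  intro n
  induction n with
  | zero =>
      intro l u hlen hnd hm
      have hl : l = [] := List.eq_nil_of_length_eq_zero (Nat.le_zero.mp hlen)
      subst hl
      have hu : u = [] := List.eq_nil_iff_forall_not_mem.mpr (fun x hx => by simpa using (hm x).mp hx)
      subst hu
      rw [pvDup]
      simp
  | succ n ih =>
      intro l u hlen hnd hm
      cases l with
      | nil =>
          have hu : u = [] := List.eq_nil_iff_forall_not_mem.mpr (fun x hx => by simpa using (hm x).mp hx)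
          subst hu
          rw [pvDup]
          simp
      | cons y ys =>
          have hyu : y ∈ u := (hm y).mpr List.mem_cons_self
          have hperm : u.Perm (y :: u.erase y) := List.perm_cons_erase hyu
          rw [hperm.countP_eq, List.countP_cons]
          have htail : (u.erase y).countP (fun x => decide ((1:Int) < ((y :: ys).count x : Nat)))
              = (u.erase y).countP (fun x => decide ((1:Int) < ((ys.filter (fun z => z ≠ y)).count x : Nat))) := by
            apply List.countP_congr
            intro a ha
            have hay : a ≠ y := ((List.Nodup.mem_erase_iff hnd).mp ha).1
            have hc1 : (y :: ys).count a = ys.count a := by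
              rw [List.count_cons]
              simp [Ne.symm hay]
            have hc2 : (ys.filter (fun z => z ≠ y)).count a = ys.count a := by
              rw [List.count_filter]
              simp [hay]
            rw [hc1, hc2]
          rw [htail]
          have hrec : (((u.erase y).countP (fun x => decide ((1:Int) < ((ys.filter (fun z => z ≠ y)).count x : Nat))) : Nat) : Int)
              = pvDup (ys.filter (fun z => z ≠ y)) := by
            apply ih
            · exact le_trans (List.length_filter_le _ _) (Nat.le_of_succ_le_succ hlen)
            · exact hnd.erase y
            · intro x
              rw [List.Nodup.mem_erase_iff hnd, hm x, List.mem_filter]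
              constructor
              · rintro ⟨hxy, hx⟩
                rcases List.mem_cons.mp hx with h1 | h2
                · exact absurd h1 hxy
                · exact ⟨h2, by simpa using hxy⟩
              · rintro ⟨hx, hxy⟩
                exact ⟨by simpa using hxy, List.mem_cons_of_mem _ hx⟩
          rw [pvDup]
          push_cast
          rw [hrec]
          simp only [List.count_cons_self]
          generalize pvDup (ys.filter (fun z => z ≠ y)) = D
          push_cast
          simp only [decide_eq_true_eq]
          split_ifs <;> omega

-- B's scan over a sorted tail
lemma pvB_scan (x : String) (xs : List String) (cnt run : Int)
    (h : (x :: xs).Pairwise (· ≤ ·)) :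
    pvBFin (xs.foldl pvBStep (cnt, some x, run))
      = cnt + (if 2 ≤ run + ((xs.count x : Nat) : Int) then 1 else 0)
          + pvDup (xs.filter (fun z => z ≠ x)) := by
  induction xs generalizing x cnt run with
  | nil =>
      simp only [List.foldl_nil, List.count_nil, List.filter_nil, pvBFin]
      rw [pvDup]
      push_cast
      split_ifs <;> omega
  | cons y ys ih =>
      by_cases hyx : y = x
      · subst hyx
        have hstep : pvBStep (cnt, some y, run) y = (cnt, some y, run + 1) := by
          simp [pvBStep]
        rw [List.foldl_cons, hstep, ih y cnt (run + 1) h.tail]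
        have hf : (y :: ys).filter (fun z => z ≠ y) = ys.filter (fun z => z ≠ y) := by simp
        rw [hf]
        simp only [List.count_cons_self]
        push_cast
        generalize pvDup (ys.filter (fun z => z ≠ y)) = D
        split_ifs <;> omega
      · have hstep : pvBStep (cnt, some x, run) y = ((if 2 ≤ run then cnt + 1 else cnt), some y, 1) := by
          simp [pvBStep, hyx]
        have hx_not : x ∉ y :: ys := by
          intro hmem
          rcases List.mem_cons.mp hmem with h1 | h2
          · exact hyx h1.symm
          · have hxy : x ≤ y := (List.pairwise_cons.mp h).1 y List.mem_cons_self
            have hyxle : y ≤ x := (List.pairwise_cons.mp h.tail).1 x h2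
            exact hyx (le_antisymm hyxle hxy)
        have hc0 : (y :: ys).count x = 0 := List.count_eq_zero.mpr hx_not
        have hf : (y :: ys).filter (fun z => z ≠ x) = y :: ys := by
          rw [List.filter_eq_self]
          intro a ha
          simp only [decide_eq_true_eq]
          intro hax
          exact hx_not (hax ▸ ha)
        rw [List.foldl_cons, hstep, ih y _ 1 h.tail, hc0, hf, pvDup]
        push_cast
        generalize pvDup (ys.filter (fun z => z ≠ y)) = D
        split_ifs <;> omega

lemma pvB_char (t : List String) (h : t.Pairwise (· ≤ ·)) :
    pvBFin (t.foldl pvBStep (0, none, 0)) = pvDup t := by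
  cases t with
  | nil =>
      rw [pvDup]
      simp [pvBFin]
  | cons x xs =>
      rw [List.foldl_cons]
      rw [show pvBStep ((0 : Int), (none : Option String), (0 : Int)) x = (0, some x, 1) from by simp [pvBStep]]
      rw [pvB_scan x xs 0 1 h, pvDup]
      generalize pvDup (xs.filter (fun z => z ≠ x)) = D
      split_ifs <;> omega

-- ===== VERDICT (by name: the statement is the Claim_ definition above) =====
theorem solve_spec : Claim_equal_solve := by
  intro s k _
  unfold Spec_solve
  show solve s k = solve_alt s k
  simp only [solve, solve_alt]
  rw [← List.foldl_map (f := fun i => PySem.Str.slice s (some i) (some (i + k))) (g := pvAStep)]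
  set L := (PySem.List.pyRange 0 (PySem.Str.len s - k + 1) 1).map
    (fun i => PySem.Str.slice s (some i) (some (i + k))) with hL
  set t := PySem.List.sorted L (fun x => x) false with ht
  have hperm : t.Perm L := PySem.List.sorted_perm L (fun x => x) false
  rw [pvA_char L, pvB_char t (PySem.List.sorted_pairwise L (fun x => x))]
  have hpred : (PySem.Set.ofList L).countP (fun x => decide ((1:Int) < (L.count x : Nat)))
      = (PySem.Set.ofList L).countP (fun x => decide ((1:Int) < (t.count x : Nat))) := by
    apply List.countP_congr
    intro a _
    rw [hperm.count_eq a]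
  rw [hpred]
  exact pvCountP_dup t.length t (PySem.Set.ofList L) le_rfl (PySem.Set.nodup_ofList L)
    (fun x => by rw [PySem.Set.mem_ofList, hperm.mem_iff])
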